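-- pv_equiv track=rewrite | github.com/ysumitsingh159/Hacktoberfest-2021 | Chef and Typing.py | calc_word
-- ===== SOURCE A (Python) =====
-- side = dict([('d', 0), ('f', 0), ('j', 1), ('k', 1)])
--
-- def calc_word(x):
--     total = 2
--     prev = side[x[0]]
--     for y in x[1:]:
--         if side[y] == prev:
--             total += 4
--         else:
--             total += 2
--             prev = side[y]
--     return total
-- ===== SOURCE B (Python) =====
-- side = dict([('d', 0), ('f', 0), ('j', 1), ('k', 1)])
--
-- def calc_word(x):
--     s = [side[c] for c in x]
--
--     def runs(lo, hi):
--         # number of maximal constant runs in s[lo:hi] (requires hi > lo)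
--         if hi - lo == 1:
--             return 1
--         mid = (lo + hi) // 2
--         r = runs(lo, mid) + runs(mid, hi)
--         if s[mid - 1] == s[mid]:
--             r -= 1  # the two halves share a run across the boundary
--         return r
--
--     return 4 * len(s) - 2 * runs(0, len(s))
-- ===== Notes on version B (the rewrite author's own statement) =====
-- stated objective: alternative
-- what changed: Replaces A's left-to-right accumulator with a divide-and-conquer run counter (split the string, count runs in each half, subtract one when the halves share a run across the boundary) and the closed form 4*n - 2*runs.
import Mathlib
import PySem

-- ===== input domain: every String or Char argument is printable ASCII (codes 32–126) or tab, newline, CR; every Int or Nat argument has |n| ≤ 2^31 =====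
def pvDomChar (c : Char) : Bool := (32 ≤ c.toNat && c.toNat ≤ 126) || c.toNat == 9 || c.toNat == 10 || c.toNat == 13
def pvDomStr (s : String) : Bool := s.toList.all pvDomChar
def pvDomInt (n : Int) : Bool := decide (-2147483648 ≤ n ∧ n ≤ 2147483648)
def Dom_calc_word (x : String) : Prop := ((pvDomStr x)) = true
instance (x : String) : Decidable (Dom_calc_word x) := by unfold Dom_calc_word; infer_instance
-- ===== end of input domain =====

-- B replaces A's left-to-right accumulator by a divide-and-conquer run counter
-- and the closed form 4*n - 2*runs (objective: alternative).

-- ===== PORT A =====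
-- module-level: side = dict([('d', 0), ('f', 0), ('j', 1), ('k', 1)])
def pvSideDict : PySem.Dict Char Int :=
  PySem.Dict.ofList [('d', 0), ('f', 0), ('j', 1), ('k', 1)]

-- side[c]; a missing key is a KeyError in Python — such inputs are excluded by Pre_calc_word,
-- so the default 0 is never observed on admitted inputs.
def pvSide (c : Char) : Int := (pvSideDict.get? c).getD 0

def calc_word (x : String) : Int :=
  let cs := x.toList
  match PySem.List.pyGet? cs 0 with
  | none => 0  -- x[0] raises IndexError on the empty string: excluded by Pre_calc_word
  | some c0 =>
    -- state (total, prev), total = 2, prev = side[x[0]]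
    ((PySem.List.slice cs (some 1) none).foldl
      (fun (st : Int × Int) y =>
        if pvSide y == st.2 then (st.1 + 4, st.2) else (st.1 + 2, pvSide y))
      (2, pvSide c0)).1

-- ===== PORT B =====
-- Source B's nested 'runs(lo, hi)': number of maximal constant runs in s[lo:hi].
-- Python requires hi > lo (it diverges on hi - lo = 0, never reached under Pre_);
-- the guard 'hi ≤ lo + 1' only totalizes that unreachable case.
def pvRuns (s : List Int) (lo hi : Nat) : Int :=
  if hi ≤ lo + 1 then 1
  else
    let mid := (lo + hi) / 2
    let r := pvRuns s lo mid + pvRuns s mid hi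
    if PySem.List.pyGet? s ((mid : Int) - 1) == PySem.List.pyGet? s (mid : Int) then r - 1 else r
termination_by hi - lo
decreasing_by all_goals omega

def calc_word_alt (x : String) : Int :=
  let s := x.toList.map pvSide
  4 * (s.length : Int) - 2 * pvRuns s 0 s.length

-- ===== PRECONDITION & SPEC =====
-- Pre_ excludes exactly the inputs on which A raises: the empty string (IndexError on x[0])
-- and strings containing a character other than d/f/j/k (KeyError on side[…]).
def Pre_calc_word (x : String) : Prop :=
  x.toList ≠ [] ∧ (x.toList.all (fun c => c == 'd' || c == 'f' || c == 'j' || c == 'k')) = true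
instance (x : String) : Decidable (Pre_calc_word x) := by unfold Pre_calc_word; infer_instance
def pvWitness_calc_word : String := "dfjk"

def Spec_calc_word (x : String) (out : Int) : Prop := out = calc_word_alt x
instance (x : String) (out : Int) : Decidable (Spec_calc_word x out) := by unfold Spec_calc_word; infer_instance

-- ===== CLAIM (what is proved, stated in full; the proofs are below) =====
def Claim_equal_calc_word : Prop := ∀ (x : String), Dom_calc_word x → Pre_calc_word x → Spec_calc_word x (calc_word x)

-- ===== LEMMAS AND PROOFS =====

-- number of side-changing adjacent pairs of an Int list
def pvTrans : List Int → Int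
  | a :: b :: r => (if a = b then 0 else 1) + pvTrans (b :: r)
  | _ => 0

-- A's loop, started with prev = side c and running total t, computes
-- t + 4*|ys| - 2*pvTrans (map side (c::ys)).
theorem calc_word_loop_eq (c : Char) (ys : List Char) (t : Int) :
    (ys.foldl
      (fun (st : Int × Int) y =>
        if pvSide y == st.2 then (st.1 + 4, st.2) else (st.1 + 2, pvSide y))
      (t, pvSide c)).1
    = t + 4 * ys.length - 2 * pvTrans ((c :: ys).map pvSide) := by
  induction ys generalizing c t with
  | nil => simp [pvTrans]
  | cons y ys ih =>
    simp only [List.foldl_cons, List.map_cons, pvTrans]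
    by_cases h : pvSide y = pvSide c
    · simp only [h, beq_self_eq_true, if_true]
      rw [show (t + 4, pvSide c) = (t + 4, pvSide y) from by rw [h], ih y (t + 4)]
      simp only [List.map_cons, List.length_cons]
      push_cast; rw [h]; ring
    · have hb : (pvSide y == pvSide c) = false := by simp [h]
      have h' : ¬ pvSide c = pvSide y := fun e => h e.symm
      simp only [hb, Bool.false_eq_true, if_false, if_neg h']
      rw [ih y (t + 2)]
      simp only [List.map_cons, List.length_cons]
      push_cast; ring

-- pvTrans as a sum over adjacent-pair indices
theorem pvTrans_eq_sum (r : List Int) (a : Int) :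
    pvTrans (a :: r)
      = ∑ i ∈ Finset.range r.length,
          (if (a :: r).getD i 0 = (a :: r).getD (i + 1) 0 then (0 : Int) else 1) := by
  induction r generalizing a with
  | nil => simp [pvTrans]
  | cons b r ih =>
    simp only [pvTrans, List.length_cons]
    rw [Finset.sum_range_succ', ih b]
    have hcong : (∑ i ∈ Finset.range r.length,
        if (b :: r).getD i 0 = (b :: r).getD (i + 1) 0 then (0 : Int) else 1)
      = ∑ i ∈ Finset.range r.length,
          if (a :: b :: r).getD (i + 1) 0 = (a :: b :: r).getD (i + 1 + 1) 0 then (0 : Int) else 1 := by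
      refine Finset.sum_congr rfl fun i _ => ?_
      simp [List.getD]
    rw [hcong]
    simp [add_comm]

-- the divide-and-conquer run counter equals 1 + the number of boundary changes
theorem pvRuns_eq (s : List Int) (lo hi : Nat) (h1 : lo < hi) (h2 : hi ≤ s.length) :
    pvRuns s lo hi
      = 1 + ∑ i ∈ Finset.Ico lo (hi - 1),
          (if s.getD i 0 = s.getD (i + 1) 0 then (0 : Int) else 1) := by
  rw [pvRuns]
  by_cases hb : hi ≤ lo + 1
  · have : hi = lo + 1 := by omega
    subst this
    simp
  · simp only [hb, if_false]
    have hm1 : lo < (lo + hi) / 2 := by omega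
    have hm2 : (lo + hi) / 2 < hi := by omega
    set mid := (lo + hi) / 2 with hmid
    have hmem1 : mid - 1 < s.length := by omega
    have hmem2 : mid < s.length := by omega
    have hget1 : PySem.List.pyGet? s ((mid : Int) - 1) = some (s.getD (mid - 1) 0) := by
      rw [show (mid : Int) - 1 = ((mid - 1 : Nat) : Int) from by omega,
        PySem.List.pyGet?_natCast, List.getElem?_eq_getElem hmem1,
        List.getD_eq_getElem _ _ hmem1]
    have hget2 : PySem.List.pyGet? s (mid : Int) = some (s.getD mid 0) := by
      rw [PySem.List.pyGet?_natCast, List.getElem?_eq_getElem hmem2,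
        List.getD_eq_getElem _ _ hmem2]
    rw [pvRuns_eq s lo mid hm1 (by omega), pvRuns_eq s mid hi hm2 h2, hget1, hget2]
    have hsplit :
        (∑ i ∈ Finset.Ico lo (hi - 1),
            (if s.getD i 0 = s.getD (i + 1) 0 then (0 : Int) else 1))
          = (∑ i ∈ Finset.Ico lo (mid - 1),
              (if s.getD i 0 = s.getD (i + 1) 0 then (0 : Int) else 1))
            + ∑ i ∈ Finset.Ico (mid - 1) (hi - 1),
                (if s.getD i 0 = s.getD (i + 1) 0 then (0 : Int) else 1) := by
      rw [Finset.sum_Ico_consecutive _ (by omega) (by omega)]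
    have hpeel :
        (∑ i ∈ Finset.Ico (mid - 1) (hi - 1),
            (if s.getD i 0 = s.getD (i + 1) 0 then (0 : Int) else 1))
          = (if s.getD (mid - 1) 0 = s.getD mid 0 then (0 : Int) else 1)
            + ∑ i ∈ Finset.Ico mid (hi - 1),
                (if s.getD i 0 = s.getD (i + 1) 0 then (0 : Int) else 1) := by
      rw [Finset.sum_eq_sum_Ico_succ_bot (by omega : mid - 1 < hi - 1)]
      rw [show mid - 1 + 1 = mid from by omega]
    rw [hsplit, hpeel]
    by_cases heq : s.getD (mid - 1) 0 = s.getD mid 0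
    · simp only [heq, beq_self_eq_true, if_true]
      ring
    · have hbf : (some (s.getD (mid - 1) 0) == some (s.getD mid 0)) = false := by
        simp only [beq_eq_false_iff_ne, ne_eq, Option.some.injEq]
        exact heq
      simp only [hbf, Bool.false_eq_true, if_false, if_neg heq]
      ring
termination_by hi - lo
decreasing_by all_goals omega

-- ===== VERDICT (by name: the statement is the Claim_ definition above) =====
theorem calc_word_spec : Claim_equal_calc_word := by
  intro x _ hpre
  obtain ⟨hne, -⟩ := hpre
  unfold Spec_calc_word calc_word calc_word_alt
  obtain ⟨c0, ys, hcs⟩ : ∃ c0 ys, x.toList = c0 :: ys := by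
    cases h : x.toList with
    | nil => exact absurd h hne
    | cons a l => exact ⟨a, l, rfl⟩
  simp only [hcs, PySem.List.pyGet?_zero_cons, PySem.List.slice_from_one, List.tail_cons,
    List.map_cons, List.length_cons]
  rw [calc_word_loop_eq,
    pvRuns_eq _ 0 ((ys.map pvSide).length + 1) (by omega) (by simp),
    show (ys.map pvSide).length + 1 - 1 = (ys.map pvSide).length from rfl]
  rw [← Finset.range_eq_Ico]
  rw [← pvTrans_eq_sum]
  simp only [List.map_cons, List.length_map]
  push_cast; ring
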